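-- pv_equiv track=rewrite | github.com/FSoft-AI4Code/Mainframe-Studio | mainframe-workers/src/parsers/variable_flow_utils.py | extract_var_name_suffix
-- ===== SOURCE A (Python) =====
-- def extract_var_name_suffix(var_name: str) -> str:
--     """
--     Extracts the suffix part of a COBOL variable name
--     Example:
--     - "X(7:8)" -> "(7:8)"
--     - "X" -> ""
--     """
--     suffix = ""
--     in_parens = False
--     for c in var_name:
--         if c == "(":
--             in_parens = True
--         if in_parens:
--             suffix += c
--     return suffix
-- ===== SOURCE B (Python) =====
-- def extract_var_name_suffix(var_name: str) -> str:
--     idx = var_name.find("(")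
--     return "" if idx == -1 else var_name[idx:]
-- ===== Notes on version B (the rewrite author's own statement) =====
-- stated objective: simpler
-- what changed: Replaces the per-character loop with its in_parens flag and repeated string concatenation by one str.find of the opening parenthesis followed by a single slice.
import Mathlib
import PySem

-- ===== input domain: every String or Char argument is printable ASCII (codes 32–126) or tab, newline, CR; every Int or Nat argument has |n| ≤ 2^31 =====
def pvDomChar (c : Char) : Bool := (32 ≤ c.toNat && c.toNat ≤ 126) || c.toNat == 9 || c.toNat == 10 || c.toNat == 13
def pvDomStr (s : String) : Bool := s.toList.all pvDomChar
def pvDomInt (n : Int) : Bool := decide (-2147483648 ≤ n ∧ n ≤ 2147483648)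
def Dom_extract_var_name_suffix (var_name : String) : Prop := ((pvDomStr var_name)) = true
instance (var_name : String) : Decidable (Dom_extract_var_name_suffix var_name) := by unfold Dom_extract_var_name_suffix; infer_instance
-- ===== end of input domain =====

-- B replaces A's character loop with in_parens flag by find('(') plus one slice (simpler).

-- ===== PORT A =====
-- loop body: in_parens is updated first, then the character is appended when in_parens holds
def pvStepA (st : List Char × Bool) (c : Char) : List Char × Bool :=
  let in_parens := if c = '(' then true else st.2
  (if in_parens then st.1 ++ [c] else st.1, in_parens)

def extract_var_name_suffix (var_name : String) : String :=
  String.ofList (var_name.toList.foldl pvStepA ([], false)).1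

-- ===== PORT B =====
def extract_var_name_suffix_alt (var_name : String) : String :=
  let idx := PySem.Str.find var_name "("
  if idx = -1 then "" else PySem.Str.slice var_name (some idx) none

-- ===== PRECONDITION & SPEC =====
def Spec_extract_var_name_suffix (var_name : String) (out : String) : Prop := out = extract_var_name_suffix_alt var_name
instance (var_name : String) (out : String) : Decidable (Spec_extract_var_name_suffix var_name out) := by unfold Spec_extract_var_name_suffix; infer_instance

-- ===== CLAIM (what is proved, stated in full; the proofs are below) =====
def Claim_equal_extract_var_name_suffix : Prop := ∀ (var_name : String), Dom_extract_var_name_suffix var_name → Spec_extract_var_name_suffix var_name (extract_var_name_suffix var_name)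

-- ===== LEMMAS AND PROOFS =====

-- once in_parens is true, A appends every remaining character
theorem pvFoldA_true (l : List Char) (acc : List Char) :
    l.foldl pvStepA (acc, true) = (acc ++ l, true) := by
  induction l generalizing acc with
  | nil => simp
  | cons c cs ih => simp [pvStepA, ih]

-- A's loop from a false flag yields the accumulator followed by dropWhile (· ≠ '(')
theorem pvFoldA_false (l : List Char) (acc : List Char) :
    (l.foldl pvStepA (acc, false)).1 = acc ++ l.dropWhile (· ≠ '(') := by
  induction l generalizing acc with
  | nil => simp
  | cons c cs ih =>
    by_cases hc : c = '('
    · subst hc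
      simp [pvStepA, pvFoldA_true, List.dropWhile]
    · simp only [List.foldl, pvStepA, if_neg hc]
      rw [List.dropWhile_cons_of_pos (by simpa using hc)]
      simpa using ih acc

theorem pvDropWhile_eq_drop (l : List Char) (n : Nat) (hn : n < l.length) (h1 : l[n] = '(')
    (h2 : ∀ i, (hi : i < l.length) → i < n → l[i] ≠ '(') :
    l.dropWhile (· ≠ '(') = l.drop n := by
  induction l generalizing n with
  | nil => simp at hn
  | cons c cs ih =>
    cases n with
    | zero => simp_all [List.dropWhile]
    | succ m =>
      have hc : c ≠ '(' := h2 0 (by simp) (by omega)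
      rw [List.dropWhile_cons_of_pos (by simpa using hc), List.drop_succ_cons]
      exact ih m (by simpa using hn) (by simpa using h1)
        (fun i hi hlt => by have := h2 (i+1) (by simpa using hi) (by omega); simpa using this)

theorem pvSingletonPrefix (x : Char) (l : List Char) : [x] <+: l ↔ l.head? = some x := by
  cases l with
  | nil => simp
  | cons c cs =>
    constructor
    · rintro ⟨t, ht⟩
      simp at ht
      simp [ht.1]
    · intro h
      simp at h
      exact ⟨cs, by simp [h]⟩

-- ===== VERDICT (by name: the statement is the Claim_ definition above) =====
theorem extract_var_name_suffix_spec : Claim_equal_extract_var_name_suffix := by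
  intro s _
  unfold Spec_extract_var_name_suffix extract_var_name_suffix extract_var_name_suffix_alt
  set l := s.toList with hl
  by_cases hfind : PySem.Str.find s "(" = -1
  · -- no '(' in s: the predicate (· ≠ '(') holds everywhere, dropWhile drops all
    rw [if_pos hfind]
    have hnotin : ¬ ['('] <:+: l := by
      have := PySem.Str.find_eq_neg_one_iff (s := s) (sub := "(")
      simpa [hl] using this.mp hfind
    have hmem : '(' ∉ l := by
      intro hm
      obtain ⟨s1, s2, h12⟩ := List.append_of_mem hm
      exact hnotin (by rw [h12]; exact ⟨s1, s2, by simp⟩)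
    have hdw : l.dropWhile (· ≠ '(') = [] := by
      rw [List.dropWhile_eq_nil_iff]
      intro x hx
      simp only [ne_eq, decide_not, Bool.not_eq_true', decide_eq_false_iff_not]
      rintro rfl; exact hmem hx
    rw [pvFoldA_false, hdw]
    rfl
  · -- '(' occurs: find points at the first occurrence, and dropWhile drops up to it
    rw [if_neg hfind]
    have hfe : PySem.Str.find s "(" = PySem.Chars.find l "(".toList := by
      simp [hl]
    have h0 : 0 ≤ PySem.Chars.find l "(".toList := by
      have := PySem.Chars.neg_one_le_find (s := l) (sub := "(".toList)
      rcases lt_or_eq_of_le this with h | h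
      · omega
      · exact absurd (by rw [hfe, ← h]) hfind
    obtain ⟨hpre, hmin⟩ := PySem.Chars.find_spec (s := l) (sub := "(".toList) h0
    set n := (PySem.Chars.find l "(".toList).toNat with hn
    have hgp : "(".toList = ['('] := rfl
    have hlen : n < l.length := by
      rcases (pvSingletonPrefix '(' (l.drop n)).mp (by rwa [hgp] at hpre) with h
      have : (l.drop n) ≠ [] := by intro he; rw [he] at h; simp at h
      have := List.length_pos_of_ne_nil this
      simp at this
      omega
    have hget : l[n] = '(' := by
      have := (pvSingletonPrefix '(' (l.drop n)).mp (by rwa [hgp] at hpre)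
      rw [List.head?_drop] at this
      simpa [List.getElem?_eq_getElem hlen] using this
    have hbefore : ∀ i, (hi : i < l.length) → i < n → l[i] ≠ '(' := by
      intro i hi hlt heq
      exact hmin i hlt ((pvSingletonPrefix '(' (l.drop i)).mpr
        (by rw [List.head?_drop]; simp [List.getElem?_eq_getElem hi, heq]))
    apply String.ext
    rw [PySem.Str.toList_slice, PySem.Chars.slice_eq_listSlice,
        PySem.List.slice_from s.toList (by rw [hfe]; exact h0)]
    simp only [String.toList_ofList]
    rw [pvFoldA_false, pvDropWhile_eq_drop l n hlen hget hbefore]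
    simp [hl, hn]
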